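-- pv_equiv track=rewrite | github.com/diffblue/cprover-sv-comp | scripts/SV-COMP/statsdiff.py | status_to_int
-- ===== SOURCE A (Python) =====
-- def status_to_int(status, suffix):
--     if status is None:
--         return None
--     if status.lower() == "out of memory" or status.lower().startswith("error"):
--         return 2
--     if status.lower() == "true" or status.lower() == "true(" + suffix + ")":
--         return 1
--     if not (status.lower() == "false" or status.lower() == "false(" + suffix + ")") and suffix == "valid-memtrack":
--         return status_to_int(status, "valid-memsafety")
--     if not(status.lower() == "false" or status.lower() == "false(" + suffix + ")"):
--         return 2
--     return 0
-- ===== SOURCE B (Python) =====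
-- def status_to_int(status, suffix):
--     if status is None:
--         return None
--     s = status.lower()
--     if s == "out of memory" or s.startswith("error"):
--         return 2
--     if s == "true" or s == "true(" + suffix + ")":
--         return 1
--     if s == "false" or s == "false(" + suffix + ")":
--         return 0
--     if suffix == "valid-memtrack":
--         if s == "true(valid-memsafety)":
--             return 1
--         if s == "false(valid-memsafety)":
--             return 0
--     return 2
-- ===== Notes on version B (the rewrite author's own statement) =====
-- stated objective: simpler
-- what changed: Replaced the one-level recursion (re-running the whole classifier with suffix 'valid-memsafety') with a flat chain of checks that lowers the status once and inlines the two memsafety cases directly.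
import Mathlib
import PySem

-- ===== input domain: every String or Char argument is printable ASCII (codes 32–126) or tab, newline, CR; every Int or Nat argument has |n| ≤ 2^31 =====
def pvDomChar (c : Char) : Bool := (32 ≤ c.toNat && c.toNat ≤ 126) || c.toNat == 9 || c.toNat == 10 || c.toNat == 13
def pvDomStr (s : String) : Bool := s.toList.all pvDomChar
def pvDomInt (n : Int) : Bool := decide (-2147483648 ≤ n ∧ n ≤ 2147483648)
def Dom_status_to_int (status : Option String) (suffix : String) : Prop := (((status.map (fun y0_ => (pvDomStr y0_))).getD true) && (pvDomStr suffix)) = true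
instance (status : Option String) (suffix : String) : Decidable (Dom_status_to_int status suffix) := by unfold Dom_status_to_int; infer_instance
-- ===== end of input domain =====

-- ===== PORT A =====
-- B simplifies A: the one-level recursion is flattened into a direct chain that lowers the status once.
def status_to_int (status : Option String) (suffix : String) : Option Int :=
  match status with
  | none => none
  | some st =>
    if PySem.Str.lower st = "out of memory" ∨ PySem.Str.startswith (PySem.Str.lower st) "error" = true then
      some 2
    else if PySem.Str.lower st = "true" ∨ PySem.Str.lower st = "true(" ++ suffix ++ ")" then
      some 1
    else if ¬ (PySem.Str.lower st = "false" ∨ PySem.Str.lower st = "false(" ++ suffix ++ ")") ∧ suffix = "valid-memtrack" then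
      status_to_int status "valid-memsafety"
    else if ¬ (PySem.Str.lower st = "false" ∨ PySem.Str.lower st = "false(" ++ suffix ++ ")") then
      some 2
    else
      some 0
termination_by (if suffix = "valid-memtrack" then 1 else 0)
decreasing_by simp_all

-- ===== PORT B =====
def status_to_int_alt (status : Option String) (suffix : String) : Option Int :=
  match status with
  | none => none
  | some st =>
    let s := PySem.Str.lower st
    if s = "out of memory" ∨ PySem.Str.startswith s "error" = true then some 2
    else if s = "true" ∨ s = "true(" ++ suffix ++ ")" then some 1
    else if s = "false" ∨ s = "false(" ++ suffix ++ ")" then some 0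
    else if suffix = "valid-memtrack" then
      if s = "true(valid-memsafety)" then some 1
      else if s = "false(valid-memsafety)" then some 0
      else some 2
    else some 2

-- ===== PRECONDITION & SPEC =====
def Spec_status_to_int (status : Option String) (suffix : String) (out : Option Int) : Prop := out = status_to_int_alt status suffix
instance (status : Option String) (suffix : String) (out : Option Int) : Decidable (Spec_status_to_int status suffix out) := by unfold Spec_status_to_int; infer_instance

-- ===== CLAIM (what is proved, stated in full; the proofs are below) =====
def Claim_equal_status_to_int : Prop := ∀ (status : Option String) (suffix : String), Dom_status_to_int status suffix → Spec_status_to_int status suffix (status_to_int status suffix)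

-- ===== LEMMAS AND PROOFS =====

-- ===== VERDICT (by name: the statement is the Claim_ definition above) =====
theorem status_to_int_spec : Claim_equal_status_to_int := by
  intro status suffix _
  unfold Spec_status_to_int
  cases status with
  | none => rw [status_to_int]; rfl
  | some st =>
    rw [status_to_int, status_to_int_alt]
    by_cases hmt : suffix = "valid-memtrack"
    · subst hmt
      rw [status_to_int]
      simp only []
      split_ifs <;> simp_all
    · split_ifs <;> simp_all
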